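-- pv_equiv track=rewrite | github.com/MrPlotva/Time-Series | lorentz_research/src/motifs_comparator.py | GenerateMotifsByPattern
-- ===== SOURCE A (Python) =====
-- def GenerateMotifsByPattern(pattern, t):
--     L = len(pattern)
--     idx = []
--     idx.append(0)
--     for i in range(L):
--         idx.append(idx[len(idx) - 1] + pattern[i])
--     motifs = []
--     while idx[len(idx) - 1] != t + 1:
--         motifs.append(idx.copy())
--         for i in range(len(idx)):
--             idx[i] += 1
--     return motifs
-- ===== SOURCE B (Python) =====
-- def GenerateMotifsByPattern(pattern, t):
--     # Build the result transposed: column j is range(b_j, b_j + n) where b_j is the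
--     # j-th prefix sum and n = t + 1 - sum(pattern) rows exist; then zip the columns.
--     n = t + 1 - sum(pattern)
--     b = 0
--     cols = [range(0, n)]
--     for x in pattern:
--         b += x
--         cols.append(range(b, b + n))
--     return [list(row) for row in zip(*cols)]
-- ===== Notes on version B (the rewrite author's own statement) =====
-- stated objective: alternative
-- what changed: B builds the result transposed: each column j is the literal range(b_j, b_j+n) for the j-th prefix sum and the closed-form row count n = t+1-sum(pattern), and the rows are obtained by zip(*cols); A instead repeatedly mutates a growing index array in place and appends a copy per iteration of a while loop.
import Mathlib
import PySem

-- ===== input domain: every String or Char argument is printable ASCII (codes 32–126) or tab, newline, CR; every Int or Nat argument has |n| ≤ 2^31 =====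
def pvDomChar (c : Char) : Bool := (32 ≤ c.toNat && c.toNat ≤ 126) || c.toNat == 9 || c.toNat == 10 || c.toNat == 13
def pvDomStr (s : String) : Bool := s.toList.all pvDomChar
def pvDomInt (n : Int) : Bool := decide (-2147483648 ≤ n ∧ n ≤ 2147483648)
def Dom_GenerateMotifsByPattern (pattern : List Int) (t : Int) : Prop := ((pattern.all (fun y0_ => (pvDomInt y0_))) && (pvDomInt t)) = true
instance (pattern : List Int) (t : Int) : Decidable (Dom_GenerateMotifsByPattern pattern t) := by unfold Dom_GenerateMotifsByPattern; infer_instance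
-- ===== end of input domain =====

-- B builds the result transposed (columns are closed-form ranges, rows come from zip) instead of
-- A's while loop that mutates and copies a growing index array (objective: alternative).

-- ===== PORT A =====
-- the while loop of A: while idx[-1] != t+1: motifs.append(idx.copy()); idx[i] += 1 for all i.
-- The fuel (t+1 - idx[-1]).toNat is the exact number of iterations whenever the Python loop terminates.
def pvLoopA (t : Int) : Nat → List Int → List (List Int) → List (List Int)
  | 0, _, motifs => motifs
  | fuel + 1, idx, motifs =>
    if idx.getLastD 0 ≠ t + 1 then
      pvLoopA t fuel (idx.map (· + 1)) (motifs ++ [idx])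
    else motifs

def GenerateMotifsByPattern (pattern : List Int) (t : Int) : List (List Int) :=
  let idx := (List.range pattern.length).foldl
    (fun idx i => idx ++ [idx.getLastD 0 + pattern.getD i 0]) [0]
  pvLoopA t (t + 1 - idx.getLastD 0).toNat idx []

-- ===== PORT B =====
-- zip(*cols): pop the head of every column to form a row, stop as soon as a column is exhausted.
def pvHeads? (cols : List (List Int)) : Option (List Int × List (List Int)) :=
  cols.foldr (fun c acc => match c, acc with
    | x :: xs, some (hs, ts) => some (x :: hs, xs :: ts)
    | _, _ => none) (some ([], []))

def pvZipStar : Nat → List (List Int) → List (List Int)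
  | 0, _ => []
  | fuel + 1, cols =>
    match pvHeads? cols with
    | some (hs, ts) => hs :: pvZipStar fuel ts
    | none => []

def GenerateMotifsByPattern_alt (pattern : List Int) (t : Int) : List (List Int) :=
  let n := t + 1 - pattern.sum
  let st := pattern.foldl
    (fun (st : Int × List (List Int)) x =>
      (st.1 + x, st.2 ++ [PySem.List.pyRange (st.1 + x) (st.1 + x + n) 1]))
    (0, [PySem.List.pyRange 0 n 1])
  pvZipStar n.toNat st.2

-- ===== PRECONDITION & SPEC =====
-- Pre_ excludes exactly the inputs with sum(pattern) > t + 1, on which A's while loop never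
-- terminates (the guard 'idx[-1] != t+1' is stepped past by +1 increments), so A returns nothing there.
def Pre_GenerateMotifsByPattern (pattern : List Int) (t : Int) : Prop := pattern.sum ≤ t + 1
instance (pattern : List Int) (t : Int) : Decidable (Pre_GenerateMotifsByPattern pattern t) := by unfold Pre_GenerateMotifsByPattern; infer_instance
def pvWitness_GenerateMotifsByPattern : List Int × Int := ([1, 2], 5)

def Spec_GenerateMotifsByPattern (pattern : List Int) (t : Int) (out : List (List Int)) : Prop := out = GenerateMotifsByPattern_alt pattern t
instance (pattern : List Int) (t : Int) (out : List (List Int)) : Decidable (Spec_GenerateMotifsByPattern pattern t out) := by unfold Spec_GenerateMotifsByPattern; infer_instance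

-- ===== CLAIM (what is proved, stated in full; the proofs are below) =====
def Claim_equal_GenerateMotifsByPattern : Prop := ∀ (pattern : List Int) (t : Int), Dom_GenerateMotifsByPattern pattern t → Pre_GenerateMotifsByPattern pattern t → Spec_GenerateMotifsByPattern pattern t (GenerateMotifsByPattern pattern t)

-- ===== LEMMAS AND PROOFS =====

-- the strict prefix sums of a list starting from b
def pvPrefix : Int → List Int → List Int
  | _, [] => []
  | b, x :: xs => (b + x) :: pvPrefix (b + x) xs

-- the column starting at b + s with m entries, step 1
def pvCol (b : Int) : Nat → Int → List Int
  | 0, _ => []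
  | m + 1, s => (b + s) :: pvCol b m (s + 1)

-- the m shifted copies of base, shifts s, s+1, …
def pvRows (base : List Int) : Nat → Int → List (List Int)
  | 0, _ => []
  | m + 1, s => base.map (· + s) :: pvRows base m (s + 1)

theorem pv_base_eq (l : List Int) :
    ∀ acc : List Int,
      (List.range l.length).foldl (fun idx i => idx ++ [idx.getLastD 0 + l.getD i 0]) acc
        = l.foldl (fun b x => b ++ [b.getLastD 0 + x]) acc := by
  induction l with
  | nil => intro acc; simp
  | cons x xs ih =>
      intro acc
      simp only [List.length_cons, List.range_succ_eq_map, List.foldl_cons, List.foldl_map,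
        List.getD_cons_zero, List.getD_cons_succ]
      exact ih _

theorem pv_base_prefix (l : List Int) :
    ∀ acc : List Int, acc ≠ [] →
      l.foldl (fun b x => b ++ [b.getLastD 0 + x]) acc = acc ++ pvPrefix (acc.getLastD 0) l := by
  induction l with
  | nil => intro acc _; simp [pvPrefix]
  | cons x xs ih =>
      intro acc h
      simp only [List.foldl_cons, pvPrefix]
      rw [ih (acc ++ [acc.getLastD 0 + x]) (by simp)]
      simp [List.getLastD_eq_getLast?]

theorem pv_prefix_last (l : List Int) :
    ∀ b : Int, (b :: pvPrefix b l).getLastD 0 = b + l.sum := by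
  induction l with
  | nil => intro b; simp [pvPrefix]
  | cons x xs ih =>
      intro b
      simp only [pvPrefix, List.sum_cons]
      have := ih (b + x)
      simp only [List.getLastD_eq_getLast?] at *
      simpa [add_assoc] using this

theorem pv_getLastD_map_add (base : List Int) (s : Int) (h : base ≠ []) :
    (base.map (· + s)).getLastD 0 = base.getLastD 0 + s := by
  obtain ⟨y, hy⟩ := List.getLast?_isSome.mpr h |> Option.isSome_iff_exists.mp
  have hm : (base.map (· + s)).getLast? = some (y + s) := by
    rw [List.getLast?_map, hy]; rfl
  simp [List.getLastD_eq_getLast?, hy, hm]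

-- A's loop, run on exact fuel, produces the shifted copies of base in order
theorem pv_loopA_closed (t : Int) :
    ∀ (fuel : Nat) (base : List Int) (shift : Int) (motifs : List (List Int)),
      base ≠ [] → base.getLastD 0 + shift + fuel = t + 1 →
      pvLoopA t fuel (base.map (· + shift)) motifs = motifs ++ pvRows base fuel shift := by
  intro fuel
  induction fuel with
  | zero => intro base shift motifs _ _; simp [pvLoopA, pvRows]
  | succ n ih =>
      intro base shift motifs h hsum
      have hne : base.getLastD 0 + shift ≠ t + 1 := by push_cast at hsum; omega
      have hmap : (base.map (· + shift)).map (· + 1) = base.map (· + (shift + 1)) := by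
        simp only [List.map_map]; apply List.map_congr_left; intro y _; simp; ring
      simp only [pvLoopA, pv_getLastD_map_add base shift h, if_pos hne, hmap, pvRows]
      rw [ih base (shift + 1) _ h (by push_cast at hsum ⊢; omega)]
      simp

-- pvHeads? on a list of uniformly nonempty columns
theorem pv_heads_map (bs : List Int) (f : Int → Int) (r : Int → List Int) :
    pvHeads? (bs.map (fun b => f b :: r b)) = some (bs.map f, bs.map r) := by
  induction bs with
  | nil => rfl
  | cons b bs ih =>
      simp only [List.map_cons, pvHeads?, List.foldr_cons]
      unfold pvHeads? at ih
      rw [ih]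

-- zip(*cols) of the step-1 columns yields the shifted rows
theorem pv_zipstar_closed :
    ∀ (m : Nat) (bs : List Int) (s0 : Int),
      pvZipStar m (bs.map (fun b => pvCol b m s0)) = pvRows bs m s0 := by
  intro m
  induction m with
  | zero => intro bs s0; simp [pvZipStar, pvRows]
  | succ n ih =>
      intro bs s0
      simp only [pvCol, pvZipStar, pvRows]
      rw [show (bs.map fun b => (b + s0) :: pvCol b n (s0 + 1))
            = bs.map (fun b => (fun b => b + s0) b :: (fun b => pvCol b n (s0 + 1)) b) from rfl,
        pv_heads_map]
      simp only [ih bs (s0 + 1)]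

-- B's fold builds exactly the range-columns over the prefix sums
theorem pv_cols_eq (n : Int) (l : List Int) :
    ∀ (b0 : Int) (acc : List (List Int)),
      l.foldl (fun (st : Int × List (List Int)) x =>
          (st.1 + x, st.2 ++ [PySem.List.pyRange (st.1 + x) (st.1 + x + n) 1])) (b0, acc)
        = (b0 + l.sum, acc ++ (pvPrefix b0 l).map (fun b => PySem.List.pyRange b (b + n) 1)) := by
  induction l with
  | nil => intro b0 acc; simp [pvPrefix]
  | cons x xs ih =>
      intro b0 acc
      simp only [List.foldl_cons, pvPrefix, List.sum_cons, List.map_cons]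
      rw [ih (b0 + x) _]
      simp [add_assoc]

-- a Python range(a, a+n) is the recursive column pvCol a n.toNat 0
theorem pv_col_pyRange : ∀ (m : Nat) (a s : Int),
    PySem.List.pyRange (a + s) (a + s + m) 1 = pvCol a m s := by
  intro m
  induction m with
  | zero => intro a s; simp [pvCol, PySem.List.pyRange_one_eq_nil]
  | succ n ih =>
      intro a s
      rw [PySem.List.pyRange_one_cons (by push_cast; omega)]
      have : a + s + 1 = a + (s + 1) := by ring
      rw [show a + s + (n + 1 : Nat) = a + (s + 1) + (n : Nat) by push_cast; ring, this,
        ih a (s + 1)]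
      rfl

theorem pv_range_col (a n : Int) :
    PySem.List.pyRange a (a + n) 1 = pvCol a n.toNat 0 := by
  by_cases h : n ≤ 0
  · rw [PySem.List.pyRange_one_eq_nil (by omega), Int.toNat_of_nonpos h]; rfl
  · have h' : 0 < n := lt_of_not_ge h
    have := pv_col_pyRange n.toNat a 0
    rw [show a + (0:Int) = a by ring, show ((n.toNat : Int)) = n by omega] at this
    exact this

-- the ports agree whenever sum(pattern) ≤ t + 1
theorem pv_ports_eq (pattern : List Int) (t : Int)
    (hpre : pattern.sum ≤ t + 1) :
    GenerateMotifsByPattern pattern t = GenerateMotifsByPattern_alt pattern t := by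
  simp only [GenerateMotifsByPattern, GenerateMotifsByPattern_alt]
  rw [pv_base_eq, pv_base_prefix pattern [0] (by simp), pv_cols_eq]
  have h0 : ([0] : List Int).getLastD 0 = 0 := rfl
  simp only [h0, List.singleton_append]
  set n : Int := t + 1 - pattern.sum with hn
  have hlast : (0 :: pvPrefix 0 pattern).getLastD 0 = pattern.sum := by
    simpa using pv_prefix_last pattern 0
  have hA := pv_loopA_closed t n.toNat (0 :: pvPrefix 0 pattern) 0 [] (by simp)
    (by rw [hlast]; omega)
  have hbase : (0 :: pvPrefix 0 pattern).map (· + 0) = 0 :: pvPrefix 0 pattern := by simp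
  rw [hlast, ← hbase, hA]
  have hc0 : PySem.List.pyRange 0 n 1 = pvCol 0 n.toNat 0 := by
    simpa using pv_range_col 0 n
  have hctail : (pvPrefix 0 pattern).map (fun b => PySem.List.pyRange b (b + n) 1)
      = (pvPrefix 0 pattern).map (fun b => pvCol b n.toNat 0) :=
    List.map_congr_left fun b _ => pv_range_col b n
  rw [hc0, hctail,
    show (pvCol 0 n.toNat 0 :: (pvPrefix 0 pattern).map (fun b => pvCol b n.toNat 0))
      = (0 :: pvPrefix 0 pattern).map (fun b => pvCol b n.toNat 0) from rfl,
    pv_zipstar_closed n.toNat (0 :: pvPrefix 0 pattern) 0]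
  simp

-- ===== VERDICT (by name: the statement is the Claim_ definition above) =====
theorem GenerateMotifsByPattern_spec : Claim_equal_GenerateMotifsByPattern := by
  intro pattern t _ hpre
  unfold Spec_GenerateMotifsByPattern
  exact pv_ports_eq pattern t hpre
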